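-- pv_equiv track=rewrite | github.com/wxxv/ULDA_LIRIS_PGL | data_augment_cmixup.py | sec_extend
-- ===== SOURCE A (Python) =====
-- def sec_extend(t, t_len, min_len, t_max):
--     i = 0
--     while t_len < min_len:
--         if t[t_len - 1] != t_max-1 and i % 2 == 0:
--             t.append(t[t_len - 1] + 1)
--             i += 1
--             t_len += 1
--         elif t[0] != 0 and i % 2 == 1:
--             t.insert(0, t[0] - 1)
--             i += 1
--             t_len += 1
--         else:
--             i += 1
--     return t, t_len
-- ===== SOURCE B (Python) =====
-- # Closed-form re-implementation: compute the prepend/append counts arithmetically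
-- # and build the result with two ranges in one pass. Returns a NEW list; A mutates
-- # t in place (the equivalence is about the return value only).
-- def sec_extend(t, t_len, min_len, t_max):
--     if t_len >= min_len:
--         return t, t_len
--     need = min_len - t_len
--     last = t[t_len - 1]
--     head = t[0]
--     grow = min((need + 1) // 2, t_max - 1 - last)  # append side gets the odd slot
--     keep = need - grow
--     if keep > head:
--         keep = head
--         grow = need - keep
--     return list(range(head - keep, head)) + t + list(range(last + 1, last + grow + 1)), min_len
-- ===== Notes on version B (the rewrite author's own statement) =====
-- stated objective: alternative
-- what changed: A grows the list one element at a time in a while loop that alternates appends and front inserts; B computes the prepend/append counts in closed form (half-and-half, clamped at the two bounds) and builds the result with two range() calls in one pass; Pre_ excludes inputs on which A raises IndexError or diverges, and out-of-range inputs (negative head or last element already past t_max-1) on which A's '!=' bound tests overshoot and any extension value is accidental.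
-- outside the precondition, e.g. on sec_extend([0, 5], 1, 3, 10): A returns ([0, 5, 1, 6], 3), B returns ([0, 5, 1, 2], 3); on sec_extend([5], 1, 3, 3): A returns ([4, 5, 6], 3), B returns ([0, 1, 2, 3, 4, 5], 3); on sec_extend([-3], 1, 2, 5): A returns ([-3, -2], 2), B returns ([-3, -2, -1, 0, 1], 2)
import Mathlib
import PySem

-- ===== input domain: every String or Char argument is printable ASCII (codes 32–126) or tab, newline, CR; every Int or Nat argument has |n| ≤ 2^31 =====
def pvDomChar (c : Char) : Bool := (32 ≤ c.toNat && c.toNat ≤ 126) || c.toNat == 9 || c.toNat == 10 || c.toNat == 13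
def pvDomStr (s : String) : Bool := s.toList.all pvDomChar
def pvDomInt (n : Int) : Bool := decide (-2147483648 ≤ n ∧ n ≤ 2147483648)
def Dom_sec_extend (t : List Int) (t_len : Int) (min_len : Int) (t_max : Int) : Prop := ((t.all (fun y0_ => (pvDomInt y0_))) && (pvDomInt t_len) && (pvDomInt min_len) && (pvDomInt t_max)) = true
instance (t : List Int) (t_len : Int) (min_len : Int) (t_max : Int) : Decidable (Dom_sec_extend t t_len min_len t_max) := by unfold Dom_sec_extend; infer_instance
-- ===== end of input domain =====

-- B computes the prepend/append counts in closed form and builds the result with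
-- two ranges in one pass, instead of A's element-by-element while loop; A mutates
-- t in place, B returns a new list — the equivalence proved here is about the
-- return value only.

-- ===== PORT A =====
-- the while loop of A; fuel only makes the recursion total (2*need+1 steps always
-- suffice on Pre_; outside Pre_ the Python loop diverges or raises IndexError)
def secLoopA (fuel : Nat) (t : List Int) (t_len : Int) (i : Nat) (min_len : Int) (t_max : Int) : List Int × Int :=
  match fuel with
  | 0 => (t, t_len)
  | Nat.succ f =>
    if t_len < min_len then
      match PySem.List.pyGet? t (t_len - 1) with
      | none => (t, t_len)  -- IndexError (excluded by Pre_)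
      | some last =>
        if last ≠ t_max - 1 ∧ i % 2 = 0 then
          secLoopA f (t ++ [last + 1]) (t_len + 1) (i + 1) min_len t_max
        else
          match PySem.List.pyGet? t 0 with
          | none => (t, t_len)  -- IndexError (excluded by Pre_)
          | some hd =>
            if hd ≠ 0 ∧ i % 2 = 1 then
              secLoopA f ((hd - 1) :: t) (t_len + 1) (i + 1) min_len t_max
            else
              secLoopA f t t_len (i + 1) min_len t_max
    else (t, t_len)

def sec_extend (t : List Int) (t_len : Int) (min_len : Int) (t_max : Int) : List Int × Int :=
  secLoopA (2 * (min_len - t_len).toNat + 1) t t_len 0 min_len t_max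

-- ===== PORT B =====
def sec_extend_alt (t : List Int) (t_len : Int) (min_len : Int) (t_max : Int) : List Int × Int :=
  if t_len ≥ min_len then (t, t_len)
  else
    match PySem.List.pyGet? t (t_len - 1), PySem.List.pyGet? t 0 with
    | some last, some head =>
      let need := min_len - t_len
      let grow := min (PySem.Int.floordiv (need + 1) 2) (t_max - 1 - last)
      let keep := need - grow
      let kg : Int × Int := if keep > head then (head, need - head) else (keep, grow)
      (PySem.List.pyRange (head - kg.1) head 1 ++ t ++ PySem.List.pyRange (last + 1) (last + kg.2 + 1) 1, min_len)
    | _, _ => (t, t_len)  -- IndexError (excluded by Pre_)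

-- ===== PRECONDITION & SPEC =====
-- When an extension is actually needed (t_len < min_len), Pre_ excludes: t_len not
-- the real length of t or t empty (A raises IndexError or indexes accidentally),
-- inputs where both ends saturate before min_len is reached (A's while loop never
-- terminates), and out-of-range inputs — a negative head or a last element already
-- past t_max - 1 — on which A's '!=' bound tests overshoot their bounds and any
-- extension value is accidental.  Whenever t_len ≥ min_len, A returns immediately
-- and nothing is excluded.
def Pre_sec_extend (t : List Int) (t_len : Int) (min_len : Int) (t_max : Int) : Prop :=
  t_len < min_len →
    (t_len = t.length ∧ t ≠ [] ∧ 0 ≤ t.head! ∧ t.getLast! ≤ t_max - 1 ∧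
      min_len ≤ t_len + (t_max - 1 - t.getLast!) + t.head!)
instance (t : List Int) (t_len : Int) (min_len : Int) (t_max : Int) : Decidable (Pre_sec_extend t t_len min_len t_max) := by
  unfold Pre_sec_extend; infer_instance

def pvWitness_sec_extend : List Int × Int × Int × Int := ([1, 2], 2, 5, 10)

def Spec_sec_extend (t : List Int) (t_len : Int) (min_len : Int) (t_max : Int) (out : List Int × Int) : Prop := out = sec_extend_alt t t_len min_len t_max
instance (t : List Int) (t_len : Int) (min_len : Int) (t_max : Int) (out : List Int × Int) : Decidable (Spec_sec_extend t t_len min_len t_max out) := by unfold Spec_sec_extend; infer_instance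

-- ===== CLAIM (what is proved, stated in full; the proofs are below) =====
def Claim_equal_sec_extend : Prop := ∀ (t : List Int) (t_len : Int) (min_len : Int) (t_max : Int), Dom_sec_extend t t_len min_len t_max → Pre_sec_extend t t_len min_len t_max → Spec_sec_extend t t_len min_len t_max (sec_extend t t_len min_len t_max)

-- ===== LEMMAS AND PROOFS =====

-- number of appends/prepends A performs from a state with `need` cells still
-- missing, `ca`/`cp` appends/prepends still possible, parity `b` (= i % 2 == 1)
def counts : Nat → Nat → Nat → Bool → Nat × Nat
  | 0, _, _, _ => (0, 0)
  | Nat.succ k, ca, cp, false =>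
      if ca ≠ 0 then ((counts k (ca - 1) cp true).1 + 1, (counts k (ca - 1) cp true).2)
      else if cp ≠ 0 then ((counts k ca (cp - 1) false).1, (counts k ca (cp - 1) false).2 + 1)
      else (0, 0)
  | Nat.succ k, ca, cp, true =>
      if cp ≠ 0 then ((counts k ca (cp - 1) false).1, (counts k ca (cp - 1) false).2 + 1)
      else if ca ≠ 0 then ((counts k (ca - 1) cp true).1 + 1, (counts k (ca - 1) cp true).2)
      else (0, 0)

-- closed form of counts (B's arithmetic, in Nat): (appends, prepends)
def closedA (need ca cp : Nat) (b : Bool) : Nat × Nat :=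
  let ha := if b then need / 2 else (need + 1) / 2
  if ca < ha then (ca, need - ca)
  else if cp < need - ha then (need - cp, cp)
  else (ha, need - ha)


lemma getLast?_some (t : List Int) (h : t ≠ []) : t.getLast? = some t.getLast! := by
  cases t with
  | nil => simp at h
  | cons a l =>
    rw [List.getLast?_eq_some_getLast (by simp)]
    simp [List.getLast!]

lemma getLast!_append (t : List Int) (x : Int) : (t ++ [x]).getLast! = x := by
  have h := getLast?_some (t ++ [x]) (by simp)
  rw [List.getLast?_concat] at h
  exact (Option.some_inj.mp h).symm

lemma getLast!_cons (t : List Int) (h : t ≠ []) (x : Int) : (x :: t).getLast! = t.getLast! := by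
  have a := getLast?_some (x :: t) (by simp)
  have b := getLast?_some t h
  have c : (x :: t).getLast? = some t.getLast! := by
    rw [List.getLast?_cons, b]; simp
  rw [c] at a
  exact (Option.some_inj.mp a).symm

lemma head!_append (t : List Int) (h : t ≠ []) (x : Int) : (t ++ [x]).head! = t.head! := by
  cases t with
  | nil => simp at h
  | cons a l => simp

lemma pyGet?_head (t : List Int) (h : t ≠ []) : PySem.List.pyGet? t 0 = some t.head! := by
  rw [PySem.List.pyGet?_zero]
  cases t with
  | nil => simp at h
  | cons a l => simp

lemma pyGet?_last (t : List Int) (h : t ≠ []) :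
    PySem.List.pyGet? t ((t.length : Int) - 1) = some t.getLast! := by
  have h1 : t.length ≠ 0 := by simpa using h
  have h2 : ((t.length : Int) - 1) = ((t.length - 1 : Nat) : Int) := by omega
  rw [h2, PySem.List.pyGet?_natCast, ← List.getLast?_eq_getElem?]
  exact getLast?_some t h

lemma counts_ca_zero : ∀ (need cp : Nat) (b : Bool), need ≤ cp → counts need 0 cp b = (0, need) := by
  intro need
  induction need with
  | zero => intro cp b _; cases b <;> rfl
  | succ k ih =>
    intro cp b h
    have hcp : cp ≠ 0 := by omega
    cases b <;> simp [counts, hcp, ih (cp - 1) _ (by omega)]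

lemma counts_cp_zero : ∀ (need ca : Nat) (b : Bool), need ≤ ca → counts need ca 0 b = (need, 0) := by
  intro need
  induction need with
  | zero => intro ca b _; cases b <;> rfl
  | succ k ih =>
    intro ca b h
    have hca : ca ≠ 0 := by omega
    cases b <;> simp [counts, hca, ih (ca - 1) _ (by omega)]

set_option maxHeartbeats 2000000 in
set_option maxRecDepth 8192 in
lemma counts_eq_closed : ∀ (need ca cp : Nat) (b : Bool), need ≤ ca + cp →
    counts need ca cp b = closedA need ca cp b := by
  intro need
  induction need with
  | zero => intro ca cp b _; cases b <;> simp [counts, closedA]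
  | succ k ih =>
    intro ca cp b h
    cases b
    · by_cases hca : ca = 0
      · subst hca
        have hcp : cp ≠ 0 := by omega
        rw [show counts (k+1) 0 cp false
              = ((counts k 0 (cp-1) false).1, (counts k 0 (cp-1) false).2 + 1) by
            simp [counts, hcp]]
        rw [ih 0 (cp-1) false (by omega)]
        simp only [closedA]
        split_ifs <;> (try contradiction) <;> (apply Prod.ext <;> dsimp only <;> omega)
      · rw [show counts (k+1) ca cp false
              = ((counts k (ca-1) cp true).1 + 1, (counts k (ca-1) cp true).2) by
            simp [counts, hca]]
        rw [ih (ca-1) cp true (by omega)]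
        simp only [closedA]
        split_ifs <;> (try contradiction) <;> (apply Prod.ext <;> dsimp only <;> omega)
    · by_cases hcp : cp = 0
      · subst hcp
        have hca : ca ≠ 0 := by omega
        rw [show counts (k+1) ca 0 true
              = ((counts k (ca-1) 0 true).1 + 1, (counts k (ca-1) 0 true).2) by
            simp [counts, hca]]
        rw [ih (ca-1) 0 true (by omega)]
        simp only [closedA]
        split_ifs <;> (try contradiction) <;> (apply Prod.ext <;> dsimp only <;> omega)
      · rw [show counts (k+1) ca cp true
              = ((counts k ca (cp-1) false).1, (counts k ca (cp-1) false).2 + 1) by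
            simp [counts, hcp]]
        rw [ih ca (cp-1) false (by omega)]
        simp only [closedA]
        split_ifs <;> (try contradiction) <;> (apply Prod.ext <;> dsimp only <;> omega)

-- once the tail is saturated (last = t_max-1), A only prepends
lemma secLoopA_prependOnly : ∀ (fuel need : Nat) (t : List Int) (i : Nat) (m t_max : Int),
    t ≠ [] → t.getLast! = t_max - 1 → (m : Int) - t.length = need → 2 * need ≤ fuel + i % 2 →
    (t.head! < 0 ∨ (need : Int) ≤ t.head!) →
    secLoopA fuel t t.length i m t_max =
      (PySem.List.pyRange (t.head! - need) t.head! 1 ++ t, m) := by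
  intro fuel
  induction fuel with
  | zero =>
    intro need t i m t_max ht hl hm hf hh
    have hi : i % 2 < 2 := Nat.mod_lt _ (by norm_num)
    have h0 : need = 0 := by omega
    subst h0
    rw [PySem.List.pyRange_one_eq_nil (by omega)]
    simp only [secLoopA, List.nil_append]
    exact Prod.ext rfl (by omega)
  | succ f ih =>
    intro need t i m t_max ht hl hm hf hh
    by_cases hlt : (t.length : Int) < m
    · have hne : need ≠ 0 := by omega
      obtain ⟨k, rfl⟩ : ∃ k, need = k + 1 := ⟨need - 1, by omega⟩
      have hcond1 : ¬(t.getLast! ≠ t_max - 1 ∧ i % 2 = 0) := by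
        intro hc; exact hc.1 hl
      rcases Nat.mod_two_eq_zero_or_one i with hi | hi
      · -- even parity: skip this iteration
        have hcond2 : ¬(t.head! ≠ 0 ∧ i % 2 = 1) := by
          intro hc; omega
        simp only [secLoopA, if_pos hlt, pyGet?_last t ht, pyGet?_head t ht,
          if_neg hcond1, if_neg hcond2]
        exact ih (k+1) t (i+1) m t_max ht hl hm (by omega) hh
      · -- odd parity: prepend
        have hh0 : t.head! ≠ 0 := by rcases hh with h | h <;> omega
        have hcond2 : t.head! ≠ 0 ∧ i % 2 = 1 := ⟨hh0, hi⟩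
        simp only [secLoopA, if_pos hlt, pyGet?_last t ht, pyGet?_head t ht,
          if_neg hcond1, if_pos hcond2]
        have hlen' : ((t.length : Int) + 1) = (((t.head! - 1) :: t).length : Int) := by
          simp <;> push_cast <;> ring
        rw [hlen']
        rw [ih k ((t.head! - 1) :: t) (i+1) m t_max (by simp)
          (by rw [getLast!_cons t ht]; exact hl)
          (by simp <;> push_cast <;> omega) (by omega)
          (by simp; rcases hh with h | h <;> [left; right] <;> push_cast <;> omega)]
        have hhd : ((t.head! - 1) :: t).head! = t.head! - 1 := by simp
        rw [hhd]
        have e1 : PySem.List.pyRange (t.head! - 1 - (k:Int)) (t.head! - 1) 1 ++ ((t.head! - 1) :: t)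
            = (PySem.List.pyRange (t.head! - 1 - (k:Int)) (t.head! - 1) 1 ++ [t.head! - 1]) ++ t := by
          simp
        rw [e1, ← PySem.List.pyRange_one_succ_right (by omega)]
        have e2 : t.head! - 1 + 1 = t.head! := by ring
        have e3 : t.head! - 1 - (k:Int) = t.head! - ((k:Int) + 1) := by ring
        rw [e2, e3]
        norm_cast
    · have h0 : need = 0 := by omega
      subst h0
      rw [PySem.List.pyRange_one_eq_nil (by omega)]
      simp only [secLoopA, if_neg hlt, List.nil_append]
      exact Prod.ext rfl (by omega)

-- once the head is saturated (head = 0), A only appends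
lemma secLoopA_appendOnly : ∀ (fuel need : Nat) (t : List Int) (i : Nat) (m t_max : Int),
    t ≠ [] → t.head! = 0 → (m : Int) - t.length = need → 2 * need + i % 2 ≤ fuel + 1 →
    (t_max - 1 < t.getLast! ∨ (need : Int) ≤ t_max - 1 - t.getLast!) →
    secLoopA fuel t t.length i m t_max =
      (t ++ PySem.List.pyRange (t.getLast! + 1) (t.getLast! + 1 + need) 1, m) := by
  intro fuel
  induction fuel with
  | zero =>
    intro need t i m t_max ht hh hm hf hhc
    have hi : i % 2 < 2 := Nat.mod_lt _ (by norm_num)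
    have h0 : need = 0 := by omega
    subst h0
    rw [show (((0:Nat)):Int) = 0 by norm_cast, add_zero,
      PySem.List.pyRange_one_eq_nil (by omega)]
    simp only [secLoopA, List.append_nil]
    exact Prod.ext rfl (by omega)
  | succ f ih =>
    intro need t i m t_max ht hh hm hf hhc
    by_cases hlt : (t.length : Int) < m
    · have hne : need ≠ 0 := by omega
      obtain ⟨k, rfl⟩ : ∃ k, need = k + 1 := ⟨need - 1, by omega⟩
      rcases Nat.mod_two_eq_zero_or_one i with hi | hi
      · -- even parity: append
        have hl : t.getLast! ≠ t_max - 1 := by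
          rcases hhc with h | h
          · omega
          · push_cast at h; omega
        have hcond1 : t.getLast! ≠ t_max - 1 ∧ i % 2 = 0 := ⟨hl, hi⟩
        simp only [secLoopA, if_pos hlt, pyGet?_last t ht, if_pos hcond1]
        have hlen' : ((t.length : Int) + 1) = ((t ++ [t.getLast! + 1]).length : Int) := by
          simp
        rw [hlen']
        rw [ih k (t ++ [t.getLast! + 1]) (i+1) m t_max (by simp)
          (by rw [head!_append t ht]; exact hh)
          (by simp <;> push_cast <;> omega) (by omega)
          (by rw [getLast!_append]
              rcases hhc with h | h
              · left; omega
              · right; push_cast at h ⊢; omega)]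
        rw [getLast!_append]
        have e1 : t ++ [t.getLast! + 1] ++ PySem.List.pyRange (t.getLast! + 1 + 1) (t.getLast! + 1 + 1 + (k:Int)) 1
            = t ++ ((t.getLast! + 1) :: PySem.List.pyRange (t.getLast! + 1 + 1) (t.getLast! + 1 + 1 + (k:Int)) 1) := by
          simp
        rw [e1, ← PySem.List.pyRange_one_cons (by push_cast; omega)]
        have e2 : t.getLast! + 1 + 1 + (k:Int) = t.getLast! + 1 + ((k:Int) + 1) := by ring
        rw [e2]
        norm_cast
      · -- odd parity: skip
        have hcond1 : ¬(t.getLast! ≠ t_max - 1 ∧ i % 2 = 0) := by intro hc; omega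
        have hcond2 : ¬(t.head! ≠ 0 ∧ i % 2 = 1) := by intro hc; exact hc.1 hh
        simp only [secLoopA, if_pos hlt, pyGet?_last t ht, pyGet?_head t ht,
          if_neg hcond1, if_neg hcond2]
        exact ih (k+1) t (i+1) m t_max ht hh hm (by omega) hhc
    · have h0 : need = 0 := by omega
      subst h0
      rw [show (((0:Nat)):Int) = 0 by norm_cast, add_zero,
        PySem.List.pyRange_one_eq_nil (by omega)]
      simp only [secLoopA, if_neg hlt, List.append_nil]
      exact Prod.ext rfl (by omega)

-- the main characterisation of A's loop by counts
lemma secLoopA_char : ∀ (fuel need : Nat) (t : List Int) (i : Nat) (m t_max : Int) (ca cp : Nat),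
    t ≠ [] → (m : Int) - t.length = need → 2 * need ≤ fuel →
    (t_max - 1 < t.getLast! → need ≤ ca) →
    (t.getLast! ≤ t_max - 1 → (ca : Int) = t_max - 1 - t.getLast!) →
    (t.head! < 0 → need ≤ cp) →
    (0 ≤ t.head! → (cp : Int) = t.head!) →
    need ≤ ca + cp →
    secLoopA fuel t t.length i m t_max =
      (PySem.List.pyRange (t.head! - ((counts need ca cp (i % 2 == 1)).2 : Int)) t.head! 1
        ++ t
        ++ PySem.List.pyRange (t.getLast! + 1) (t.getLast! + 1 + ((counts need ca cp (i % 2 == 1)).1 : Int)) 1,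
       m) := by
  intro fuel
  induction fuel with
  | zero =>
    intro need t i m t_max ca cp ht hm hf _ _ _ _ _
    have h0 : need = 0 := by omega
    subst h0
    have hc : counts 0 ca cp (i % 2 == 1) = (0, 0) := by cases (i % 2 == 1) <;> rfl
    rw [hc]
    simp only [Nat.cast_zero, sub_zero, add_zero]
    rw [PySem.List.pyRange_one_eq_nil (by omega), PySem.List.pyRange_one_eq_nil (by omega)]
    simp only [secLoopA, List.nil_append, List.append_nil]
    exact Prod.ext rfl (by omega)
  | succ f ih =>
    intro need t i m t_max ca cp ht hm hf hca1 hca2 hcp1 hcp2 hsum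
    by_cases hlt : (t.length : Int) < m
    · have hne : need ≠ 0 := by omega
      obtain ⟨k, rfl⟩ : ∃ k, need = k + 1 := ⟨need - 1, by omega⟩
      rcases Nat.mod_two_eq_zero_or_one i with hi | hi
      · -- even parity
        have hb : (i % 2 == 1) = false := by simp [hi]
        rw [hb]
        by_cases hca : ca = 0
        · -- tail saturated: skip, then prepend only
          subst hca
          have hl : t.getLast! = t_max - 1 := by
            by_cases hc : t_max - 1 < t.getLast!
            · have := hca1 hc; omega
            · have := hca2 (by omega); omega
          have hcond1 : ¬(t.getLast! ≠ t_max - 1 ∧ i % 2 = 0) := by intro hc; exact hc.1 hl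
          have hcond2 : ¬(t.head! ≠ 0 ∧ i % 2 = 1) := by intro hc; omega
          simp only [secLoopA, if_pos hlt, pyGet?_last t ht, pyGet?_head t ht,
            if_neg hcond1, if_neg hcond2]
          rw [counts_ca_zero (k+1) cp false (by omega)]
          simp only [Nat.cast_zero, add_zero]
          rw [PySem.List.pyRange_one_eq_nil (le_refl _), List.append_nil]
          exact secLoopA_prependOnly f (k+1) t (i+1) m t_max ht hl hm (by omega)
            (by by_cases hc : t.head! < 0
                · left; exact hc
                · right; have := hcp2 (by omega); omega)
        · -- append
          have hl : t.getLast! ≠ t_max - 1 := by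
            by_cases hc : t_max - 1 < t.getLast!
            · omega
            · have := hca2 (by omega); omega
          have hcond1 : t.getLast! ≠ t_max - 1 ∧ i % 2 = 0 := ⟨hl, hi⟩
          simp only [secLoopA, if_pos hlt, pyGet?_last t ht, if_pos hcond1]
          have hlen' : ((t.length : Int) + 1) = ((t ++ [t.getLast! + 1]).length : Int) := by simp
          rw [hlen']
          rw [ih k (t ++ [t.getLast! + 1]) (i+1) m t_max (ca-1) cp (by simp)
            (by simp <;> push_cast <;> omega) (by omega)
            (by rw [getLast!_append]; intro hc
                by_cases hd : t_max - 1 < t.getLast!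
                · have := hca1 hd; omega
                · have := hca2 (by omega); omega)
            (by rw [getLast!_append]; intro hc
                have := hca2 (by omega); push_cast; omega)
            (by rw [head!_append t ht]; intro hc; have := hcp1 hc; omega)
            (by rw [head!_append t ht]; exact hcp2)
            (by omega)]
          rw [head!_append t ht, getLast!_append]
          have hb' : ((i+1) % 2 == 1) = true := by simp; omega
          rw [hb']
          rw [show counts (k+1) ca cp false
                = ((counts k (ca-1) cp true).1 + 1, (counts k (ca-1) cp true).2) by
              simp [counts, hca]]
          simp only
          rw [show t.getLast! + 1 + 1 + ((counts k (ca-1) cp true).1 : Int)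
              = t.getLast! + 1 + (((counts k (ca-1) cp true).1 + 1 : Nat) : Int) by push_cast; ring]
          rw [PySem.List.pyRange_one_cons
            (show t.getLast! + 1 < t.getLast! + 1 + (((counts k (ca-1) cp true).1 + 1 : Nat) : Int) by push_cast; omega)]
          simp [List.append_assoc]
      · -- odd parity
        have hb : (i % 2 == 1) = true := by simp [hi]
        rw [hb]
        by_cases hcp : cp = 0
        · -- head saturated: skip, then append only
          subst hcp
          have hh0 : t.head! = 0 := by
            by_cases hc : t.head! < 0
            · have := hcp1 hc; omega
            · have := hcp2 (by omega); omega
          have hcond1 : ¬(t.getLast! ≠ t_max - 1 ∧ i % 2 = 0) := by intro hc; omega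
          have hcond2 : ¬(t.head! ≠ 0 ∧ i % 2 = 1) := by intro hc; exact hc.1 hh0
          simp only [secLoopA, if_pos hlt, pyGet?_last t ht, pyGet?_head t ht,
            if_neg hcond1, if_neg hcond2]
          rw [counts_cp_zero (k+1) ca true (by omega)]
          simp only [Nat.cast_zero, sub_zero]
          rw [PySem.List.pyRange_one_eq_nil (le_refl _), List.nil_append]
          exact secLoopA_appendOnly f (k+1) t (i+1) m t_max ht hh0 hm (by omega)
            (by by_cases hc : t_max - 1 < t.getLast!
                · left; exact hc
                · right; have := hca2 (by omega); push_cast; omega)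
        · -- prepend
          have hh0 : t.head! ≠ 0 := by
            by_cases hc : t.head! < 0
            · omega
            · have := hcp2 (by omega); omega
          have hcond1 : ¬(t.getLast! ≠ t_max - 1 ∧ i % 2 = 0) := by intro hc; omega
          have hcond2 : t.head! ≠ 0 ∧ i % 2 = 1 := ⟨hh0, hi⟩
          simp only [secLoopA, if_pos hlt, pyGet?_last t ht, pyGet?_head t ht,
            if_neg hcond1, if_pos hcond2]
          have hlen' : ((t.length : Int) + 1) = (((t.head! - 1) :: t).length : Int) := by
            simp <;> push_cast <;> ring
          rw [hlen']
          rw [ih k ((t.head! - 1) :: t) (i+1) m t_max ca (cp-1) (by simp)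
            (by simp <;> push_cast <;> omega) (by omega)
            (by rw [getLast!_cons t ht]; intro hc; have := hca1 hc; omega)
            (by rw [getLast!_cons t ht]; exact hca2)
            (by simp; intro hc; have := hcp1 (by omega); omega)
            (by simp; intro hc; have := hcp2 (by omega); push_cast; omega)
            (by omega)]
          rw [getLast!_cons t ht]
          have hhd : ((t.head! - 1) :: t).head! = t.head! - 1 := by simp
          rw [hhd]
          have hb' : ((i+1) % 2 == 1) = false := by simp; omega
          rw [hb']
          rw [show counts (k+1) ca cp true
                = ((counts k ca (cp-1) false).1, (counts k ca (cp-1) false).2 + 1) by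
              simp [counts, hcp]]
          simp only
          rw [show t.head! - (((counts k ca (cp-1) false).2 + 1 : Nat) : Int)
              = t.head! - 1 - ((counts k ca (cp-1) false).2 : Int) by push_cast; ring]
          have hseg : PySem.List.pyRange (t.head! - 1 - ((counts k ca (cp-1) false).2 : Int)) t.head! 1
              = PySem.List.pyRange (t.head! - 1 - ((counts k ca (cp-1) false).2 : Int)) (t.head! - 1) 1 ++ [t.head! - 1] := by
            have := PySem.List.pyRange_one_succ_right
              (show t.head! - 1 - (((counts k ca (cp-1) false).2 : Nat) : Int) ≤ t.head! - 1 by omega)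
            simpa using this
          rw [hseg]
          simp [List.append_assoc]
    · have h0 : need = 0 := by omega
      subst h0
      have hc : counts 0 ca cp (i % 2 == 1) = (0, 0) := by cases (i % 2 == 1) <;> rfl
      rw [hc]
      simp only [Nat.cast_zero, sub_zero, add_zero]
      rw [PySem.List.pyRange_one_eq_nil (by omega), PySem.List.pyRange_one_eq_nil (by omega)]
      simp only [secLoopA, if_neg hlt, List.nil_append, List.append_nil]
      exact Prod.ext rfl (by omega)

-- B's clamped closed-form arithmetic (on Int) computes (prepends, appends) of closedA
lemma bridge (needI L H t_max : Int) (ca cp : Nat) (hpos : 0 < needI)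
    (hca2 : (ca : Int) = t_max - 1 - L)
    (hcp2 : (cp : Int) = H)
    (hsum : needI.toNat ≤ ca + cp) :
    (if needI - min ((needI + 1) / 2) (t_max - 1 - L) > H then
       (H, needI - H)
     else (needI - min ((needI + 1) / 2) (t_max - 1 - L), min ((needI + 1) / 2) (t_max - 1 - L)))
    = (((closedA needI.toNat ca cp false).2 : Int), ((closedA needI.toNat ca cp false).1 : Int)) := by
  obtain ⟨n, hn⟩ : ∃ n : Nat, needI = (n : Int) := ⟨needI.toNat, by omega⟩
  subst hn
  simp only [closedA, gt_iff_lt, min_def, Int.toNat_natCast, Bool.false_eq_true, if_false]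
  split_ifs <;> (apply Prod.ext <;> dsimp only <;> omega)

-- ===== VERDICT (by name: the statement is the Claim_ definition above) =====
set_option maxHeartbeats 1000000 in
theorem sec_extend_spec : Claim_equal_sec_extend := by
  intro t t_len min_len t_max _ hpre
  unfold Spec_sec_extend
  by_cases hge : min_len ≤ t_len
  · -- no extension needed: both sides return (t, t_len)
    have hz : (min_len - t_len).toNat = 0 := by omega
    unfold sec_extend sec_extend_alt
    rw [hz, if_pos (by omega : t_len ≥ min_len)]
    rw [show 2 * 0 + 1 = 1 from rfl]
    simp only [secLoopA, if_neg (by omega : ¬ t_len < min_len)]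
  · push_neg at hge
    obtain ⟨hlen, ht, hhd, hla, hterm⟩ := hpre hge
    subst hlen
    have hm : min_len - (t.length : Int) = (((min_len - (t.length : Int)).toNat : Nat) : Int) := by
      omega
    set ca : Nat := (t_max - 1 - t.getLast!).toNat with hcadef
    set cp : Nat := t.head!.toNat with hcpdef
    have hca2 : (ca : Int) = t_max - 1 - t.getLast! := by omega
    have hcp2 : (cp : Int) = t.head! := by omega
    have hsum : (min_len - (t.length : Int)).toNat ≤ ca + cp := by omega
    have hchar := secLoopA_char (2 * (min_len - (t.length : Int)).toNat + 1)
      ((min_len - (t.length : Int)).toNat) t 0 min_len t_max ca cp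
      ht hm (by omega) (fun hc => by omega) (fun _ => hca2)
      (fun hc => by omega) (fun _ => hcp2) hsum
    rw [show ((0:Nat) % 2 == 1) = false from rfl] at hchar
    rw [counts_eq_closed _ _ _ false hsum] at hchar
    unfold sec_extend
    rw [hchar]
    unfold sec_extend_alt
    rw [if_neg (by omega : ¬ (t.length : Int) ≥ min_len), pyGet?_last t ht, pyGet?_head t ht]
    simp only
    rw [PySem.Int.floordiv_eq_ediv_of_pos (by norm_num : (0:Int) < 2)]
    rw [bridge (min_len - (t.length : Int)) t.getLast! t.head! t_max ca cp (by omega)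
      hca2 hcp2 hsum]
    simp only
    rw [show t.getLast! + (((closedA (min_len - (t.length : Int)).toNat ca cp false).1 : Nat) : Int) + 1
        = t.getLast! + 1 + (((closedA (min_len - (t.length : Int)).toNat ca cp false).1 : Nat) : Int) by ring]
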